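-- pv_equiv track=rewrite | github.com/MichalDrosio/python-basic | CodersWars/char_code_calculation.py | calc
-- ===== SOURCE A (Python) =====
-- def calc(x):
--     total_1 = []
--     for letter in x:
--         num = ord(letter)
--         for n in str(num):
--             total_1.append(int(n))
--
--     total_2 = []
--     for i in total_1:
--         if i == 7:
--             total_2.append(1)
--         else:
--             total_2.append(i)
--
--     return sum(total_1) - sum(total_2)
-- ===== SOURCE B (Python) =====
-- def calc(x):
--     sevens = 0
--     for letter in x:
--         sevens += str(ord(letter)).count('7')
--     return 6 * sevens
-- ===== Notes on version B (the rewrite author's own statement) =====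
-- stated objective: simpler
-- what changed: Instead of building two parallel digit lists and subtracting their sums, B maintains a single counter of seven-digits across the character codes and returns 6 times it (each replaced digit loses exactly 6).
import Mathlib
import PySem

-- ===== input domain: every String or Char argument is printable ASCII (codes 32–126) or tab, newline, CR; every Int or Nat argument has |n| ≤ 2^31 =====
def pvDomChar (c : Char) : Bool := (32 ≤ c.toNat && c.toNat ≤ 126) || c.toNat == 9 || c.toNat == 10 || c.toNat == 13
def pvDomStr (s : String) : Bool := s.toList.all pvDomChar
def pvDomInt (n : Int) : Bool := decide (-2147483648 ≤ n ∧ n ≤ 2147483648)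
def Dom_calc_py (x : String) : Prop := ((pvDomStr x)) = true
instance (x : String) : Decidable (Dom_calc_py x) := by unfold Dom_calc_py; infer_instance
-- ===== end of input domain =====

-- B replaces A's two parallel digit lists and subtraction by a single count of '7' digits times 6 (simpler state).

-- ===== PORT A =====
-- int(n) for n a single decimal-digit character of str(ord(letter)): exact as code - 48
def calc_py (x : String) : Int :=
  let total1 : List Int := x.toList.foldl (fun acc letter =>
    (PySem.Int.toChars (letter.toNat : Int)).foldl
      (fun acc2 n => acc2 ++ [((n.toNat : Int) - 48)]) acc) []
  let total2 : List Int := total1.foldl (fun acc i =>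
    if i == 7 then acc ++ [(1 : Int)] else acc ++ [i]) []
  total1.sum - total2.sum

-- ===== PORT B =====
def calc_py_alt (x : String) : Int :=
  6 * (x.toList.foldl (fun sevens letter =>
        sevens + (PySem.Str.count (PySem.Int.toStr (letter.toNat : Int)) "7" : Int)) 0)

-- ===== PRECONDITION & SPEC =====
def Spec_calc_py (x : String) (out : Int) : Prop := out = calc_py_alt x
instance (x : String) (out : Int) : Decidable (Spec_calc_py x out) := by unfold Spec_calc_py; infer_instance

-- ===== CLAIM (what is proved, stated in full; the proofs are below) =====
def Claim_equal_calc_py : Prop := ∀ (x : String), Dom_calc_py x → Spec_calc_py x (calc_py x)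

-- ===== LEMMAS AND PROOFS =====

-- per-character digit value / replaced value / seven count
def pvDig (c : Char) : Int := (c.toNat : Int) - 48
def pvRepl (i : Int) : Int := if i == 7 then 1 else i
def pvS (c : Char) : Int := ((PySem.Int.toChars (c.toNat : Int)).map pvDig).sum
def pvT (c : Char) : Int := ((PySem.Int.toChars (c.toNat : Int)).map (fun n => pvRepl (pvDig n))).sum
def pvK (c : Char) : Int := (PySem.Str.count (PySem.Int.toStr (c.toNat : Int)) "7" : Int)

theorem pv_perChar (m : Nat) (hm : m < 127) :
    (((PySem.Int.toChars (m : Int)).map (fun c => ((c.toNat : Int) - 48))).sum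
      - ((PySem.Int.toChars (m : Int)).map (fun c => pvRepl ((c.toNat : Int) - 48))).sum)
    = 6 * (PySem.Str.count (PySem.Int.toStr (m : Int)) "7" : Int) := by
  revert hm; revert m; decide

theorem pv_foldl_B (l : List Char) (a : Int) :
    l.foldl (fun sevens letter =>
        sevens + (PySem.Str.count (PySem.Int.toStr (letter.toNat : Int)) "7" : Int)) a
    = a + (l.map pvK).sum := by
  induction l generalizing a with
  | nil => simp
  | cons c t ih =>
    rw [List.foldl_cons, ih, List.map_cons, List.sum_cons]
    simp only [pvK]
    ring

theorem pv_foldl_sing {α : Type} (f : α → Int) (l : List α) (acc : List Int) :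
    l.foldl (fun a x => a ++ [f x]) acc = acc ++ l.map f := by
  induction l generalizing acc <;> simp [*]

theorem pv_sum_flatMap {α : Type} (f : α → List Int) (l : List α) :
    (l.flatMap f).sum = (l.map (fun a => (f a).sum)).sum := by
  induction l <;> simp [*]

theorem pv_main (l : List Char) (h : ∀ c ∈ l, c.toNat < 127) :
    (l.map pvS).sum - (l.map pvT).sum = 6 * (l.map pvK).sum := by
  induction l with
  | nil => simp
  | cons c t ih =>
    have hc := pv_perChar c.toNat (h c (List.mem_cons_self))
    have ht := ih (fun d hd => h d (List.mem_cons_of_mem _ hd))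
    simp only [List.map_cons, List.sum_cons]
    have : pvS c - pvT c = 6 * pvK c := by
      simpa [pvS, pvT, pvDig, pvK] using hc
    linarith

-- ===== VERDICT (by name: the statement is the Claim_ definition above) =====
theorem calc_py_spec : Claim_equal_calc_py := by
  intro x hdom
  simp only [Spec_calc_py, calc_py, calc_py_alt]
  have hdom' : ∀ c ∈ x.toList, c.toNat < 127 := by
    intro c hc
    have := List.all_eq_true.mp hdom c hc
    simp only [pvDomChar, Bool.or_eq_true, Bool.and_eq_true, beq_iff_eq,
      decide_eq_true_eq] at this
    omega
  have h1 : x.toList.foldl (fun acc letter =>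
      (PySem.Int.toChars (letter.toNat : Int)).foldl
        (fun acc2 n => acc2 ++ [((n.toNat : Int) - 48)]) acc) []
      = x.toList.flatMap (fun c => (PySem.Int.toChars (c.toNat : Int)).map pvDig) := by
    have : ∀ acc : List Int, ∀ letter : Char,
        (PySem.Int.toChars (letter.toNat : Int)).foldl
          (fun acc2 n => acc2 ++ [((n.toNat : Int) - 48)]) acc
        = acc ++ (PySem.Int.toChars (letter.toNat : Int)).map pvDig := by
      intro acc letter
      simpa [pvDig] using pv_foldl_sing (fun (n : Char) => ((n.toNat : Int) - 48)) (PySem.Int.toChars (letter.toNat : Int)) acc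
    calc x.toList.foldl (fun acc letter =>
          (PySem.Int.toChars (letter.toNat : Int)).foldl
            (fun (acc2 : List Int) (n : Char) => acc2 ++ [((n.toNat : Int) - 48)]) acc) []
        = x.toList.foldl (fun acc c =>
            acc ++ (PySem.Int.toChars (c.toNat : Int)).map pvDig) [] := by
          congr 1; funext acc c; exact this acc c
      _ = [] ++ x.toList.flatMap (fun c => (PySem.Int.toChars (c.toNat : Int)).map pvDig) :=
          PySem.List.foldl_append_eq_flatMap _ _ _
      _ = _ := by simp
  rw [h1]
  have h2 : ∀ t1 : List Int, t1.foldl (fun acc i =>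
      if i == 7 then acc ++ [(1 : Int)] else acc ++ [i]) []
      = t1.map pvRepl := by
    intro t1
    calc t1.foldl (fun acc i => if i == 7 then acc ++ [(1 : Int)] else acc ++ [i]) []
        = t1.foldl (fun acc i => acc ++ [pvRepl i]) [] := by
          congr 1; funext acc i; by_cases h : i = 7 <;> simp [pvRepl, h]
      _ = [] ++ t1.map pvRepl := PySem.List.foldl_append_singleton_eq_map _ _ _
      _ = _ := by simp
  rw [h2, pv_foldl_B]
  have h3 : ((x.toList.flatMap (fun c => (PySem.Int.toChars (c.toNat : Int)).map pvDig)).sum)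
      = (x.toList.map pvS).sum := by
    rw [pv_sum_flatMap]; unfold pvS; rfl
  have h4 : (((x.toList.flatMap (fun c => (PySem.Int.toChars (c.toNat : Int)).map pvDig)).map pvRepl).sum)
      = (x.toList.map pvT).sum := by
    rw [List.map_flatMap, pv_sum_flatMap]
    unfold pvT
    simp [List.map_map, Function.comp_def]
  rw [h3, h4, pv_main x.toList hdom', zero_add]
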